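-- pv_equiv track=rewrite | github.com/phd-course-ml-co-2021/phd-ml-co-2021-01 | notebooks/util/er.py | get_seq_hints
-- ===== SOURCE A (Python) =====
-- def get_dur(ttype):
--     durs = {'visit': 1, 'ultrasound': 2, 'RX': 2}
--     return durs[ttype] if ttype in durs else 4
--
-- def get_seq_hints(levels, codes_by_idx):
--     codes = ['red', 'yellow', 'green', 'white']
--     hints = {}
--     totdur = 0
--     for idx, lvls in sorted(levels.items(),
--             key=lambda t: codes.index(codes_by_idx[t[0]])):
--         for k, lvl in enumerate(lvls):
--             for i, a in enumerate(lvl):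
--                 hints[idx,k,i] = totdur
--                 totdur += get_dur(a)
--     return hints
-- ===== SOURCE B (Python) =====
-- def get_seq_hints(levels, codes_by_idx):
--     durs = {'visit': 1, 'ultrasound': 2, 'RX': 2}
--     hints = {}
--     totdur = 0
--     # pigeonhole on the four fixed triage codes: one pass per code, no sort
--     for code in ('red', 'yellow', 'green', 'white'):
--         for idx, lvls in levels.items():
--             if codes_by_idx[idx] != code:
--                 continue
--             for k, lvl in enumerate(lvls):
--                 for i, a in enumerate(lvl):
--                     hints[idx, k, i] = totdur
--                     totdur += durs.get(a, 4)
--     return hints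
-- ===== Notes on version B (the rewrite author's own statement) =====
-- stated objective: alternative
-- what changed: B removes the comparison sort entirely: instead of sorting the dict items by codes.index it makes one bucket pass over levels per triage code in fixed priority order (pigeonhole on the four codes), skipping non-matching items, which is correct because a stable sort by a 4-valued key is exactly the concatenation of the four filtered passes.
import Mathlib
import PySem

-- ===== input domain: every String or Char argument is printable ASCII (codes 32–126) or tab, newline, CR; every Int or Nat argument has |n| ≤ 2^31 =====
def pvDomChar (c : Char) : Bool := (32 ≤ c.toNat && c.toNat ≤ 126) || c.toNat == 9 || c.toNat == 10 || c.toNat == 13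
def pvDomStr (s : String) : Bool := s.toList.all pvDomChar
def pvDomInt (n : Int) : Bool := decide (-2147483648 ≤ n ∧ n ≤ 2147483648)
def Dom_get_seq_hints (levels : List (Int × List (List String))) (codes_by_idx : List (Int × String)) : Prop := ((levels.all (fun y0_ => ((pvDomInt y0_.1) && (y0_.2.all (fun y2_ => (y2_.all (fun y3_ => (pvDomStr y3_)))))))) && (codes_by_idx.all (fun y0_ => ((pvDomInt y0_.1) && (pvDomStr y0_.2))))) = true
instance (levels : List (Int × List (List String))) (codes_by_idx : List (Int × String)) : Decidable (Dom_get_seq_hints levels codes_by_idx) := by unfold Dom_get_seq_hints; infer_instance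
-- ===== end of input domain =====

-- B drops the comparison sort: one bucket pass over levels per triage code, in priority
-- order (pigeonhole on the four fixed codes), instead of sorting the items by codes.index
-- (objective: alternative algorithm, similar cost).

-- ===== PORT A =====
-- get_dur: durs[ttype] if ttype in durs else 4
def get_dur_port (ttype : String) : Int :=
  let durs : PySem.Dict String Int := PySem.Dict.ofList [("visit", 1), ("ultrasound", 2), ("RX", 2)]
  if durs.contains ttype then durs.getD ttype 0 else 4

def get_seq_hints (levels : List (Int × List (List String))) (codes_by_idx : List (Int × String)) : List (Int × Int × Int × Int) :=
  let codes : List String := ["red", "yellow", "green", "white"]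
  let levelsD : PySem.Dict Int (List (List String)) := PySem.Dict.ofList levels
  let cbi : PySem.Dict Int String := PySem.Dict.ofList codes_by_idx
  -- key = codes.index(codes_by_idx[t[0]]); Python raises outside Pre_, the port defaults there
  let srt := PySem.List.sorted levelsD.items
    (fun t => ((PySem.List.index? codes (cbi.getD t.1 "")).map Int.ofNat).getD 0)
  let res := srt.foldl (fun (s : PySem.Dict (Int × Int × Int) Int × Int) t =>
      (PySem.List.enumerate t.2).foldl (fun s kl =>
        (PySem.List.enumerate kl.2).foldl (fun s ia =>
          (s.1.insert (t.1, kl.1, ia.1) s.2, s.2 + get_dur_port ia.2)) s) s)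
    (PySem.Dict.empty, 0)
  res.1.items.map (fun p => (p.1.1, p.1.2.1, p.1.2.2, p.2))

-- ===== PORT B =====
def get_seq_hints_alt (levels : List (Int × List (List String))) (codes_by_idx : List (Int × String)) : List (Int × Int × Int × Int) :=
  let durs : PySem.Dict String Int := PySem.Dict.ofList [("visit", 1), ("ultrasound", 2), ("RX", 2)]
  let cbi : PySem.Dict Int String := PySem.Dict.ofList codes_by_idx
  let items := (PySem.Dict.ofList levels).items
  -- codes_by_idx[idx] raises on a missing index in Python; that is outside Pre_, the port defaults there
  let res := (["red", "yellow", "green", "white"] : List String).foldl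
    (fun (s : PySem.Dict (Int × Int × Int) Int × Int) c =>
      items.foldl (fun s t =>
        if cbi.getD t.1 "" == c then
          (PySem.List.enumerate t.2).foldl (fun s kl =>
            (PySem.List.enumerate kl.2).foldl (fun s ia =>
              (s.1.insert (t.1, kl.1, ia.1) s.2, s.2 + durs.getD ia.2 4)) s) s
        else s) s)
    (PySem.Dict.empty, 0)
  res.1.items.map (fun p => (p.1.1, p.1.2.1, p.1.2.2, p.2))

-- ===== PRECONDITION & SPEC =====
-- Pre_ excludes exactly the inputs where Python A raises: an index of levels missing from
-- codes_by_idx (KeyError) or mapped to a string outside the four triage codes (ValueError).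
def Pre_get_seq_hints (levels : List (Int × List (List String))) (codes_by_idx : List (Int × String)) : Prop :=
  ∀ p ∈ levels, (PySem.Dict.ofList codes_by_idx).getD p.1 "" ∈ (["red", "yellow", "green", "white"] : List String)
instance (levels : List (Int × List (List String))) (codes_by_idx : List (Int × String)) : Decidable (Pre_get_seq_hints levels codes_by_idx) := by unfold Pre_get_seq_hints; infer_instance

def pvWitness_get_seq_hints : (List (Int × List (List String))) × (List (Int × String)) :=
  ([(0, [["visit"], ["MRI", "RX"]]), (1, [["ultrasound"]])], [(0, "yellow"), (1, "red")])

def Spec_get_seq_hints (levels : List (Int × List (List String))) (codes_by_idx : List (Int × String)) (out : List (Int × Int × Int × Int)) : Prop := out = get_seq_hints_alt levels codes_by_idx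
instance (levels : List (Int × List (List String))) (codes_by_idx : List (Int × String)) (out : List (Int × Int × Int × Int)) : Decidable (Spec_get_seq_hints levels codes_by_idx out) := by unfold Spec_get_seq_hints; infer_instance

-- ===== CLAIM (what is proved, stated in full; the proofs are below) =====
def Claim_equal_get_seq_hints : Prop := ∀ (levels : List (Int × List (List String))) (codes_by_idx : List (Int × String)), Dom_get_seq_hints levels codes_by_idx → Pre_get_seq_hints levels codes_by_idx → Spec_get_seq_hints levels codes_by_idx (get_seq_hints levels codes_by_idx)

-- ===== LEMMAS AND PROOFS =====

-- the two duration computations agree on every string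
lemma dur_eq : get_dur_port = fun a =>
    (PySem.Dict.ofList [("visit", (1 : Int)), ("ultrasound", 2), ("RX", 2)]).getD a 4 := by
  funext s
  unfold get_dur_port
  by_cases h1 : s = "visit"; · subst h1; decide
  by_cases h2 : s = "ultrasound"; · subst h2; decide
  by_cases h3 : s = "RX"; · subst h3; decide
  simp [PySem.Dict.ofList, PySem.Dict.update, PySem.Dict.contains_insert,
    PySem.Dict.getD_insert, h1, h2, h3, PySem.Dict.contains_empty, PySem.Dict.getD_empty]

-- insertBy walks past a prefix it does not insert into
lemma insertBy_skip {α : Type} (before : α → α → Bool) (x : α) (l1 l2 : List α)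
    (h : ∀ y ∈ l1, before x y = false) :
    PySem.List.insertBy before x (l1 ++ l2) = l1 ++ PySem.List.insertBy before x l2 := by
  induction l1 with
  | nil => simp
  | cons a l ih =>
    simp only [List.cons_append, PySem.List.insertBy, h a (by simp)]
    simp only [Bool.false_eq_true, if_false]
    exact congrArg (a :: ·) (ih (fun y hy => h y (by simp [hy])))

-- insertBy inserts in front of a list it entirely precedes
lemma insertBy_front {α : Type} (before : α → α → Bool) (x : α) (l : List α)
    (h : ∀ y ∈ l, before x y = true) :
    PySem.List.insertBy before x l = x :: l := by
  cases l with
  | nil => rfl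
  | cons a t => simp [PySem.List.insertBy, h a (by simp)]

-- inserting into a concatenation of key-homogeneous buckets appends to x's own bucket
lemma insertBy_bucket {α : Type} (key : α → Int) (x : α) (vals : List Int) (g : Int → List α)
    (hv : vals.Pairwise (· < ·)) (hk : key x ∈ vals)
    (hg : ∀ v ∈ vals, ∀ y ∈ g v, key y = v) :
    PySem.List.insertBy (fun a b => decide (key a < key b)) x (vals.flatMap g)
      = vals.flatMap (fun v => g v ++ if key x = v then [x] else []) := by
  induction vals with
  | nil => simp at hk
  | cons v vs ih =>
    simp only [List.flatMap_cons]
    by_cases hxv : key x = v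
    · rw [insertBy_skip _ _ _ _ (fun y hy => by
        have := hg v (by simp) y hy
        simp [this, hxv])]
      rw [insertBy_front _ _ _ (fun y hy => by
        obtain ⟨w, hw, hyw⟩ := List.mem_flatMap.1 hy
        have h1 := hg w (by simp [hw]) y hyw
        have h2 : v < w := (List.pairwise_cons.1 hv).1 w hw
        simp [h1, hxv]; omega)]
      have hvs : vs.flatMap (fun w => g w ++ if key x = w then [x] else []) = vs.flatMap g := by
        apply List.flatMap_congr
        intro w hw
        have h2 : v < w := (List.pairwise_cons.1 hv).1 w hw
        have : key x ≠ w := by omega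
        simp [this]
      rw [hvs, if_pos hxv]
      simp
    · have hk' : key x ∈ vs := by cases List.mem_cons.1 hk with
        | inl h => exact absurd h hxv
        | inr h => exact h
      rw [insertBy_skip _ _ _ _ (fun y hy => by
        have h1 := hg v (by simp) y hy
        have h2 : v < key x := (List.pairwise_cons.1 hv).1 (key x) hk'
        simp [h1]; omega)]
      rw [ih hv.of_cons hk' (fun w hw y hy => hg w (by simp [hw]) y hy)]
      simp [hxv]

-- STABILITY of Python's sort under a finitely-valued key: sorted(xs, key) is the
-- concatenation of the filtered buckets, taken in increasing key order
lemma sorted_eq_buckets {α : Type} (key : α → Int) (vals : List Int)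
    (hv : vals.Pairwise (· < ·)) (xs : List α) (h : ∀ x ∈ xs, key x ∈ vals) :
    PySem.List.sorted xs key = vals.flatMap (fun v => xs.filter (fun x => key x == v)) := by
  rw [PySem.List.sorted_eq_foldl_insertBy]
  induction xs using List.reverseRecOn with
  | nil => simp
  | append_singleton xs x ih =>
    rw [List.foldl_append, List.foldl_cons, List.foldl_nil,
      ih (fun y hy => h y (by simp [hy]))]
    rw [insertBy_bucket key x vals _ hv (h x (by simp)) (fun v hv y hy => by
      have := List.of_mem_filter hy
      simpa using this)]
    apply List.flatMap_congr
    intro v hvv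
    rw [List.filter_append]
    simp only [List.filter_cons, List.filter_nil]
    by_cases hxv : key x = v <;> simp [hxv]

-- an item of dict(levels) carries a first component that is a key of levels
lemma mem_fst_of_mem_items_ofList {κ ν : Type} [BEq κ] [LawfulBEq κ] (l : List (κ × ν))
    (t : κ × ν) (h : t ∈ (PySem.Dict.ofList l).items) : t.1 ∈ l.map Prod.fst := by
  have h1 := PySem.Dict.mem_keys_of_mem_items _ h
  have h2 : (PySem.Dict.ofList l).keys
      = PySem.Set.update (PySem.Dict.empty (κ := κ) (ν := ν)).keys (l.map Prod.fst) :=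
    PySem.Dict.keys_foldl_insert_key l Prod.fst (fun _ p => p.2) PySem.Dict.empty
  rw [h2] at h1
  rcases (PySem.Set.mem_update _ _ _).1 h1 with h | h
  · simp [PySem.Dict.keys_empty] at h
  · exact h

theorem equal_main : ∀ (levels : List (Int × List (List String))) (codes_by_idx : List (Int × String)),
    Pre_get_seq_hints levels codes_by_idx →
    get_seq_hints levels codes_by_idx = get_seq_hints_alt levels codes_by_idx := by
  intro levels codes_by_idx hpre
  unfold get_seq_hints get_seq_hints_alt
  simp only []
  -- abbreviations
  set cbi : PySem.Dict Int String := PySem.Dict.ofList codes_by_idx with hcbi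
  set items : List (Int × List (List String)) := (PySem.Dict.ofList levels).items with hitems
  -- every item's code is one of the four triage codes
  have hmem : ∀ t ∈ items, cbi.getD t.1 "" ∈ (["red", "yellow", "green", "white"] : List String) := by
    intro t ht
    obtain ⟨p, hp, hfst⟩ := List.mem_map.1 (mem_fst_of_mem_items_ofList levels t ht)
    have := hpre p hp
    rwa [hfst] at this
  -- the A-side sort key
  set K : (Int × List (List String)) → Int := fun t =>
    ((PySem.List.index? (["red", "yellow", "green", "white"] : List String)
        (cbi.getD t.1 "")).map Int.ofNat).getD 0 with hK
  have hKmem : ∀ t ∈ items, K t ∈ ([0, 1, 2, 3] : List Int) := by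
    intro t ht
    have hc := hmem t ht
    simp only [List.mem_cons, List.not_mem_nil, or_false] at hc
    rcases hc with hc | hc | hc | hc
    · rw [hK]; simp only; rw [hc]; decide
    · rw [hK]; simp only; rw [hc]; decide
    · rw [hK]; simp only; rw [hc]; decide
    · rw [hK]; simp only; rw [hc]; decide
  -- the sorted item list is the concatenation of the four code buckets
  have hbuck : PySem.List.sorted items K
      = (["red", "yellow", "green", "white"] : List String).flatMap
          (fun c => items.filter (fun t => cbi.getD t.1 "" == c)) := by
    rw [sorted_eq_buckets K [0, 1, 2, 3] (by decide) items hKmem]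
    simp only [List.flatMap_cons, List.flatMap_nil, List.append_nil]
    have e : ∀ (v : Int) (c : String), c ∈ (["red", "yellow", "green", "white"] : List String) →
        (∀ s ∈ (["red", "yellow", "green", "white"] : List String),
          ((((PySem.List.index? (["red", "yellow", "green", "white"] : List String) s).map
              Int.ofNat).getD 0 == v)) = (s == c)) →
        items.filter (fun t => K t == v) = items.filter (fun t => cbi.getD t.1 "" == c) := by
      intro v c _ hvc
      apply List.filter_congr
      intro t ht
      have := hvc _ (hmem t ht)
      rw [hK]
      exact this
    rw [e 0 "red" (by decide) (by decide), e 1 "yellow" (by decide) (by decide),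
      e 2 "green" (by decide) (by decide), e 3 "white" (by decide) (by decide)]
  rw [hbuck, dur_eq]
  rw [List.foldl_flatMap]
  simp only [List.foldl_filter]

-- ===== VERDICT (by name: the statement is the Claim_ definition above) =====
theorem get_seq_hints_spec : Claim_equal_get_seq_hints := by
  intro levels codes_by_idx _ hpre
  unfold Spec_get_seq_hints
  exact equal_main levels codes_by_idx hpre
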